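-- pv_equiv track=rewrite | github.com/open-contracting-archive/opendatacomparison | django/website/package/management/commands/import_datamap_csv.py | detect_translated_languages_and_keys
-- ===== SOURCE A (Python) =====
-- def detect_translated_languages_and_keys(keys):
--     trans_langs_keys = {}
--
--     # attempt to split languages off of key names
--     # format as somekeyname__en_US
--     for key in keys:
--         key_components = key.split('__')
--         if len(key_components) > 1:
--             lang_string = key_components[-1]
--             if not lang_string in trans_langs_keys:
--                 trans_langs_keys[lang_string] = set([])
--
--             trans_langs_keys[lang_string].add((key_components[0], key))
--
--     # returns {'en_US': ('keyname', 'keyname__en_US'))}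
--     return trans_langs_keys
-- ===== SOURCE B (Python) =====
-- def detect_translated_languages_and_keys(keys):
--     # Alternative decomposition: flatten to (lang, (head, key)) records, then
--     # build the result as a comprehension over the first-occurrence-ordered langs.
--     records = [(c[-1], (c[0], k)) for k in keys for c in [k.split('__')] if len(c) > 1]
--     langs = list(dict.fromkeys(l for l, _ in records))
--     return {lang: {p for l, p in records if l == lang} for lang in langs}
-- ===== Notes on version B (the rewrite author's own statement) =====
-- stated objective: alternative
-- what changed: A's single pass that accumulates a dict of sets is replaced by a flatten/group decomposition: build a flat list of (lang, (head, key)) records, dedup the langs in first-occurrence order, and assemble the result as a comprehension that collects each lang's record set.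
import Mathlib
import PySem

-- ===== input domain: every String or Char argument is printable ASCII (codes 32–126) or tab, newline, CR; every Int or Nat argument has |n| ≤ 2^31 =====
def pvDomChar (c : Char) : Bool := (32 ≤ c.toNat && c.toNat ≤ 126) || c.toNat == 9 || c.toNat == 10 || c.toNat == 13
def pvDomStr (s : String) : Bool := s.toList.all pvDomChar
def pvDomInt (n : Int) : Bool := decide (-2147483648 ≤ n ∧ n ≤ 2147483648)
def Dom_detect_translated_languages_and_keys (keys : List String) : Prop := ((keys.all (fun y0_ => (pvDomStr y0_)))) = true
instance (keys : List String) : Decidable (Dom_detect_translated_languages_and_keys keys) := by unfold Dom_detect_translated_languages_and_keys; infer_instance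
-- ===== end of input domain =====

-- B replaces A's single-pass dict-of-sets accumulation by a flatten-to-records /
-- dedup-langs / per-lang comprehension decomposition (objective: alternative).


-- key.split('__'): the separator is the nonempty literal "__", so Python's split never
-- raises and PySem.Str.split? is always `some`; `.getD []` only strips the option.
def pvSplit (k : String) : List String := (PySem.Str.split? k "__").getD []

-- ===== PORT A =====
def detect_translated_languages_and_keys (keys : List String) : List (String × List (String × String)) :=
  (keys.foldl (fun d key =>
      let comps := pvSplit key
      if comps.length > 1 then
        let lang := comps.getLast!
        let d' := if d.contains lang then d else d.insert lang PySem.Set.empty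
        d'.modify lang PySem.Set.empty (fun s => PySem.Set.add s (comps.head!, key))
      else d)
    PySem.Dict.empty).items

-- ===== PORT B =====
-- B's first comprehension: flat records (lang_string, (head, key)) of the multi-component keys
def pvRecords (keys : List String) : List (String × (String × String)) :=
  keys.filterMap (fun k =>
    let c := pvSplit k
    if c.length > 1 then some (c.getLast!, (c.head!, k)) else none)

def detect_translated_languages_and_keys_alt (keys : List String) : List (String × List (String × String)) :=
  let records := pvRecords keys
  let langs := PySem.List.dedup (records.map (·.1))
  langs.map (fun lang =>
    (lang, PySem.Set.ofList ((records.filter (fun r => r.1 == lang)).map (·.2))))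

-- ===== PRECONDITION & SPEC =====
def Spec_detect_translated_languages_and_keys (keys : List String) (out : List (String × List (String × String))) : Prop := out = detect_translated_languages_and_keys_alt keys
instance (keys : List String) (out : List (String × List (String × String))) : Decidable (Spec_detect_translated_languages_and_keys keys out) := by unfold Spec_detect_translated_languages_and_keys; infer_instance

-- ===== CLAIM (what is proved, stated in full; the proofs are below) =====
def Claim_equal_detect_translated_languages_and_keys : Prop := ∀ (keys : List String), Dom_detect_translated_languages_and_keys keys → Spec_detect_translated_languages_and_keys keys (detect_translated_languages_and_keys keys)

-- ===== LEMMAS AND PROOFS =====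

-- A's loop body, abstracted over one already-extracted record
def pvStepA (d : PySem.Dict String (PySem.Set (String × String))) (r : String × (String × String)) : PySem.Dict String (PySem.Set (String × String)) :=
  let d' := if d.contains r.1 then d else d.insert r.1 PySem.Set.empty
  d'.modify r.1 PySem.Set.empty (fun s => PySem.Set.add s r.2)

theorem pvFoldA_eq (keys : List String) (d : PySem.Dict String (PySem.Set (String × String))) :
    keys.foldl (fun d key =>
      let comps := pvSplit key
      if comps.length > 1 then
        let lang := comps.getLast!
        let d' := if d.contains lang then d else d.insert lang PySem.Set.empty
        d'.modify lang PySem.Set.empty (fun s => PySem.Set.add s (comps.head!, key))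
      else d) d
    = (pvRecords keys).foldl pvStepA d := by
  induction keys generalizing d with
  | nil => rfl
  | cons k ks ih =>
    simp only [List.foldl_cons, pvRecords, List.filterMap_cons] at *
    by_cases h : (pvSplit k).length > 1
    · rw [if_pos h, if_pos h, List.foldl_cons]
      exact ih _
    · rw [if_neg h, if_neg h]
      exact ih d

theorem pvKeys_stepA (d : PySem.Dict String (PySem.Set (String × String))) (r : String × (String × String)) :
    (pvStepA d r).keys = PySem.Set.add d.keys r.1 := by
  unfold pvStepA
  rw [PySem.Dict.keys_modify]
  by_cases h : d.contains r.1
  · rw [if_pos h, PySem.Dict.keys_insert_of_contains _ _ h,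
      PySem.Set.add_of_mem ((PySem.Dict.contains_iff_mem_keys _ _).mp h)]
  · rw [if_neg h]
    have hf : d.contains r.1 = false := by simpa using h
    have h' : (d.insert r.1 PySem.Set.empty).contains r.1 = true := PySem.Dict.contains_insert_self _ _ _
    rw [PySem.Dict.keys_insert_of_contains _ _ h',
      PySem.Dict.keys_insert_of_not_contains _ _ hf,
      PySem.Set.add_of_not_mem]
    intro hm
    exact h ((PySem.Dict.contains_iff_mem_keys _ _).mpr hm)

theorem pvGetD_stepA (d : PySem.Dict String (PySem.Set (String × String))) (r : String × (String × String)) (lang : String) :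
    (pvStepA d r).getD lang PySem.Set.empty
    = if lang = r.1 then PySem.Set.add (d.getD r.1 PySem.Set.empty) r.2
      else d.getD lang PySem.Set.empty := by
  unfold pvStepA
  rw [PySem.Dict.getD_modify]
  by_cases hl : lang = r.1
  · rw [if_pos hl, if_pos hl]
    by_cases h : d.contains r.1
    · rw [if_pos h]
    · have hf : d.contains r.1 = false := by simpa using h
      rw [if_neg h, PySem.Dict.getD_insert_self,
        PySem.Dict.getD_of_not_contains _ _ hf]
  · rw [if_neg hl, if_neg hl]
    by_cases h : d.contains r.1
    · rw [if_pos h]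
    · rw [if_neg h, PySem.Dict.getD_insert_of_ne _ _ _ hl]

theorem pvKeys_foldA (rs : List (String × (String × String))) :
    ((rs.foldl pvStepA PySem.Dict.empty).keys) = PySem.Set.ofList (rs.map (·.1)) := by
  induction rs using List.reverseRecOn with
  | nil => rfl
  | append_singleton xs x ih =>
    rw [List.foldl_append, List.foldl_cons, List.foldl_nil, pvKeys_stepA, ih,
      List.map_append, List.map_cons, List.map_nil, PySem.Set.ofList_append_singleton]

theorem pvGetD_foldA (rs : List (String × (String × String))) (lang : String) :
    (rs.foldl pvStepA PySem.Dict.empty).getD lang PySem.Set.empty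
    = PySem.Set.ofList ((rs.filter (fun r => r.1 == lang)).map (·.2)) := by
  induction rs using List.reverseRecOn with
  | nil => rfl
  | append_singleton xs x ih =>
    rw [List.foldl_append, List.foldl_cons, List.foldl_nil, pvGetD_stepA, List.filter_append]
    by_cases h : lang = x.1
    · rw [if_pos h]
      have hfilter : List.filter (fun r => r.1 == lang) [x] = [x] := by
        simp [h.symm]
      rw [hfilter, List.map_append, List.map_cons, List.map_nil,
        PySem.Set.ofList_append_singleton, ← ih, h]
    · rw [if_neg h]
      have hne : ¬ x.1 = lang := fun e => h e.symm
      have hfilter : List.filter (fun r => r.1 == lang) [x] = [] := by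
        simp [hne]
      rw [hfilter, List.append_nil, ih]

-- ===== VERDICT (by name: the statement is the Claim_ definition above) =====
theorem detect_translated_languages_and_keys_spec : Claim_equal_detect_translated_languages_and_keys := by
  intro keys _
  unfold Spec_detect_translated_languages_and_keys detect_translated_languages_and_keys detect_translated_languages_and_keys_alt
  dsimp only
  rw [pvFoldA_eq]
  have hk := pvKeys_foldA (pvRecords keys)
  have hnd : (((pvRecords keys).foldl pvStepA PySem.Dict.empty).keys).Nodup := by
    rw [hk]; exact PySem.Set.nodup_ofList _
  rw [PySem.Dict.items_eq_map_keys _ hnd PySem.Set.empty, hk, PySem.List.dedup_eq_ofList]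
  exact List.map_congr_left (fun lang _ => by
    rw [pvGetD_foldA])
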